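-- pv_equiv track=rewrite | github.com/Jieay/etu-django-frame | etu_django_frame/django/2.2.2/utils/comm/commapi.py | check_dict_fields
-- ===== SOURCE A (Python) =====
-- import copy
--
-- def check_dict_fields(data, ck_fields):
--     """
--     检查数据字典中，查询的字段不存在值则 返回 False
--     :param data: 数据字典
--     :param ck_fields: 查询字段 列表
--     :return: False or True
--     """
--     if not isinstance(ck_fields, (list, tuple)):
--         ck_fields = [ck_fields]
--
--     _info = copy.deepcopy(ck_fields)
--     if isinstance(data, dict):
--         for i in ck_fields:
--             ck_v = data.get(i, None)
--             if ck_v is not None: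
--                 _info.remove(i)
--     if _info:
--         return False
--     return True
-- ===== SOURCE B (Python) =====
-- def check_dict_fields(data, ck_fields):
--     """
--     检查数据字典中，查询的字段不存在值则 返回 False
--     """
--     if not isinstance(ck_fields, (list, tuple)):
--         ck_fields = [ck_fields]
--     if not isinstance(data, dict):
--         return not ck_fields
--     valid = {k for k, v in data.items() if v is not None}
--     return all(f in valid for f in ck_fields)
-- ===== Notes on version B (the rewrite author's own statement) =====
-- stated objective: idiomatic
-- what changed: Instead of deep-copying the field list and removing found fields one by one (each removal a linear scan), B builds the set of non-None keys of data once and checks each field by set membership with all().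
import Mathlib
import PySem

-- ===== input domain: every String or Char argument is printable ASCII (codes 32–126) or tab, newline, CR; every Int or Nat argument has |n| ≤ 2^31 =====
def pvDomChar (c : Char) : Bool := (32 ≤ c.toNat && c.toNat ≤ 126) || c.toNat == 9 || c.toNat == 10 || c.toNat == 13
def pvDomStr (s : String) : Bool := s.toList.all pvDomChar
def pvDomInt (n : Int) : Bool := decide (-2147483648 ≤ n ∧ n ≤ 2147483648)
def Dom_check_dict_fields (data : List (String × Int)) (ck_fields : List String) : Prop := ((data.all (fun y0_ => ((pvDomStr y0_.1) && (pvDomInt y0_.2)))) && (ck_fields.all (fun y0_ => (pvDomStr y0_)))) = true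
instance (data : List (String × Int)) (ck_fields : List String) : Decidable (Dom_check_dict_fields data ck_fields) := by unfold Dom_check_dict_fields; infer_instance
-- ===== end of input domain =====

-- B replaces A's deepcopy-and-remove bookkeeping by a one-pass set of valid keys checked with all() (idiomatic; same result).


-- ===== PORT A =====
-- data is a dict (str → int) and ck_fields a list of str under the type convention, so the
-- isinstance branches of A are statically resolved (ck_fields is a list; data is a dict).
-- `_info.remove i` raises ValueError only when i ∉ _info, which cannot happen here; the
-- `.getD inf` arm is that unreachable case.
def check_dict_fields (data : List (String × Int)) (ck_fields : List String) : Bool :=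
  let info := ck_fields  -- _info = copy.deepcopy(ck_fields)
  let info := ck_fields.foldl (fun inf i =>
    if ((PySem.Dict.mk data).get? i).isSome   -- ck_v = data.get(i, None); if ck_v is not None:
    then (PySem.List.remove? inf i).getD inf   -- _info.remove(i)
    else inf) info
  if info.isEmpty then true else false   -- if _info: return False / return True

-- ===== PORT B =====
-- the two isinstance guards are statically resolved by the types; `v is not None` is always
-- true for int values, so the comprehension keeps every key.
def check_dict_fields_alt (data : List (String × Int)) (ck_fields : List String) : Bool :=
  let valid : PySem.Set String := PySem.Set.ofList (data.map Prod.fst)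
  ck_fields.all (fun f => PySem.Set.contains valid f)

-- ===== PRECONDITION & SPEC =====
def Spec_check_dict_fields (data : List (String × Int)) (ck_fields : List String) (out : Bool) : Prop := out = check_dict_fields_alt data ck_fields
instance (data : List (String × Int)) (ck_fields : List String) (out : Bool) : Decidable (Spec_check_dict_fields data ck_fields out) := by unfold Spec_check_dict_fields; infer_instance

-- ===== CLAIM (what is proved, stated in full; the proofs are below) =====
def Claim_equal_check_dict_fields : Prop := ∀ (data : List (String × Int)) (ck_fields : List String), Dom_check_dict_fields data ck_fields → Spec_check_dict_fields data ck_fields (check_dict_fields data ck_fields)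

-- ===== LEMMAS AND PROOFS =====

-- data.get(i) finds a value exactly when i is among data's keys
theorem pv_get_isSome (data : List (String × Int)) (f : String) :
    ((PySem.Dict.mk data).get? f).isSome = (data.map Prod.fst).contains f := by
  induction data with
  | nil => simp [PySem.Dict.get?]
  | cons kv rest ih =>
    rw [PySem.Dict.get?_mk_cons]
    by_cases h : kv.1 = f
    · simp [h]
    · simp [h, ih, BEq.symm_false (beq_false_of_ne h)]

-- length of A's remaining _info after processing the fields of l, for any start state s
-- that contains each field at least as often as l does
theorem pv_fold_length (data : List (String × Int)) :
    ∀ (l s : List String), (∀ x, l.count x ≤ s.count x) →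
    (l.foldl (fun inf i =>
        if ((PySem.Dict.mk data).get? i).isSome
        then (PySem.List.remove? inf i).getD inf
        else inf) s).length
      = s.length - l.countP (fun i => ((PySem.Dict.mk data).get? i).isSome) := by
  intro l
  induction l with
  | nil => intro s _; simp
  | cons i t ih =>
    intro s hs
    have hi : i ∈ s := by
      have := hs i
      simp [List.count_cons_self] at this
      exact List.count_pos_iff.mp (by omega)
    rw [List.foldl_cons, List.countP_cons]
    by_cases hg : ((PySem.Dict.mk data).get? i).isSome = true
    · rw [if_pos hg, PySem.List.remove?_eq_some_erase s i hi, Option.getD_some]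
      have hlen : (s.erase i).length = s.length - 1 := List.length_erase_of_mem hi
      have ht : ∀ x, t.count x ≤ (s.erase i).count x := by
        intro x
        rw [List.count_erase]
        by_cases hx : i = x
        · subst hx
          have := hs i; simp [List.count_cons_self] at this
          simp; omega
        · have := hs x
          simp only [List.count_cons, beq_false_of_ne hx] at this ⊢
          omega
      rw [ih (s.erase i) ht, hlen, hg]
      have hcnt : t.countP (fun i => ((PySem.Dict.mk data).get? i).isSome) ≤ t.length :=
        List.countP_le_length
      have h1 : 0 < s.length := List.length_pos_of_mem hi
      simp only [if_true]
      omega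
    · rw [if_neg hg]
      have ht : ∀ x, t.count x ≤ s.count x := fun x => le_trans (List.count_le_count_cons ..) (hs x)
      rw [ih s ht, Bool.eq_false_iff.mpr hg]
      simp

-- ===== VERDICT (by name: the statement is the Claim_ definition above) =====
theorem check_dict_fields_spec : Claim_equal_check_dict_fields := by
  intro data ck_fields _
  unfold Spec_check_dict_fields check_dict_fields check_dict_fields_alt
  dsimp only
  have hlen := pv_fold_length data ck_fields ck_fields (fun x => le_refl _)
  have hcnt : List.countP (fun i => ((PySem.Dict.mk data).get? i).isSome) ck_fields
      ≤ ck_fields.length := List.countP_le_length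
  rw [Bool.eq_iff_iff]
  constructor
  · intro h
    split at h
    next he =>
      rw [List.isEmpty_iff_length_eq_zero, hlen] at he
      have hall := List.countP_eq_length.mp (by omega :
        List.countP (fun i => ((PySem.Dict.mk data).get? i).isSome) ck_fields = ck_fields.length)
      simp only [List.all_eq_true]
      intro f hf
      rw [PySem.Set.contains_iff, PySem.Set.mem_ofList, ← List.contains_iff_mem,
        ← pv_get_isSome data f]
      exact hall f hf
    next => exact absurd h (by simp)
  · intro h
    simp only [List.all_eq_true] at h
    have hall : ∀ f ∈ ck_fields, ((PySem.Dict.mk data).get? f).isSome = true := by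
      intro f hf
      rw [pv_get_isSome data f, List.contains_iff_mem, ← PySem.Set.mem_ofList,
        ← PySem.Set.contains_iff]
      exact h f hf
    have hc := List.countP_eq_length.mpr hall
    rw [if_pos ?emp]
    case emp =>
      rw [List.isEmpty_iff_length_eq_zero, hlen, hc]
      omega
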